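-- pv_equiv track=rewrite | github.com/ihshareef/tts-api-test | utils/helpers.py | separate_text
-- ===== SOURCE A (Python) =====
-- def separate_text(text):
--     paragraphs = []
--     words = text.split()
--     temp_paragraph = []
--     char_count = 0
--     for word in words:
--         char_count += len(word)
--         if len(word) > 4:
--             temp_paragraph.append(word)
--         if char_count >= 250 or word == "\n":
--             paragraphs.append(" ".join(temp_paragraph))
--             temp_paragraph = []
--             char_count = 0
--
--     if temp_paragraph:
--         paragraphs.append(" ".join(temp_paragraph))
--
--     return paragraphs
-- ===== SOURCE B (Python) =====
-- def separate_text(text):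
--     words = text.split()
--     # phase 1: cut the word list into segments at each point the cumulative
--     # character count (over ALL words) reaches 250, resetting after each cut
--     segments = []
--     current = []
--     count = 0
--     for w in words:
--         current = current + [w]
--         count += len(w)
--         if count >= 250:
--             segments.append((current, True))
--             current = []
--             count = 0
--     segments.append((current, False))
--     # phase 2: each paragraph is the join of the long (>4 chars) words of a segment;
--     # threshold-closed segments always emit, the trailing one only if non-empty
--     result = []
--     for seg, closed in segments:
--         kept = [w for w in seg if len(w) > 4]
--         if closed or kept:
--             result.append(" ".join(kept))
--     return result
-- ===== Notes on version B (the rewrite author's own statement) =====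
-- stated objective: alternative
-- what changed: B separates the concerns into two passes: first it cuts the word list into segments at the cumulative-250-character boundaries, then it builds each paragraph by filtering and joining a segment's long words, instead of A's single fold that interleaves counting, filtering and flushing; A's extra newline-word flush test, unreachable after split(), is dropped.
import Mathlib
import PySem

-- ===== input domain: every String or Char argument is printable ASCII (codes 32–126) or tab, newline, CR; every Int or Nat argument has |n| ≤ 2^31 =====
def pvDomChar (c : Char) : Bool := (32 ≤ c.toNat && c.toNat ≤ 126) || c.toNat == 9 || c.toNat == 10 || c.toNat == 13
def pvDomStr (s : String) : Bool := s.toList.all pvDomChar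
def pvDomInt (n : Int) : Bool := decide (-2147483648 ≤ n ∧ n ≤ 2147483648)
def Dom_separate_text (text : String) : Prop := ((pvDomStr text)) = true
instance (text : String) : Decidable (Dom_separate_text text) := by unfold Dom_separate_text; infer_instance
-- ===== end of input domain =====

-- B splits the work into two passes — cut the word list into cumulative-250-char
-- segments, then filter-and-join each segment — instead of A's single interleaved fold
-- (alternative decomposition, same cost; return-value equivalence, no mutation).


-- ===== PORT A =====
def separate_text (text : String) : List String :=
  let words := PySem.Str.split₀ text
  let st := words.foldl (fun (st : List String × List String × Int) word =>
      let char_count := st.2.2 + PySem.Str.len word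
      let temp := if PySem.Str.len word > 4 then st.2.1 ++ [word] else st.2.1
      if decide (char_count ≥ 250) || (word == "\n") then
        (st.1 ++ [PySem.Str.join " " temp], ([], (0 : Int)))
      else
        (st.1, (temp, char_count)))
    ([], ([], 0))
  if st.2.1.isEmpty then st.1 else st.1 ++ [PySem.Str.join " " st.2.1]

-- ===== PORT B =====
def separate_text_alt (text : String) : List String :=
  let words := PySem.Str.split₀ text
  let st := words.foldl (fun (st : List (List String × Bool) × List String × Int) w =>
      let current := st.2.1 ++ [w]
      let count := st.2.2 + PySem.Str.len w
      if decide (count ≥ 250) then (st.1 ++ [(current, true)], ([], (0 : Int)))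
      else (st.1, (current, count)))
    ([], ([], 0))
  let segments := st.1 ++ [(st.2.1, false)]
  segments.foldl (fun res seg =>
      let kept := seg.1.filter (fun w => decide (PySem.Str.len w > 4))
      if seg.2 || !kept.isEmpty then res ++ [PySem.Str.join " " kept] else res) []

-- ===== PRECONDITION & SPEC =====
def Spec_separate_text (text : String) (out : List String) : Prop := out = separate_text_alt text
instance (text : String) (out : List String) : Decidable (Spec_separate_text text out) := by unfold Spec_separate_text; infer_instance

-- ===== CLAIM (what is proved, stated in full; the proofs are below) =====
def Claim_equal_separate_text : Prop := ∀ (text : String), Dom_separate_text text → Spec_separate_text text (separate_text text)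

-- ===== LEMMAS AND PROOFS =====

-- the fused recursion both implementations compute
def pvFused : List String → List String → Int → List String
  | [], cur, _ =>
      let kept := cur.filter (fun w => decide (PySem.Str.len w > 4))
      if kept.isEmpty then [] else [PySem.Str.join " " kept]
  | w :: ws, cur, c =>
      if decide (c + PySem.Str.len w ≥ 250) then
        PySem.Str.join " " ((cur ++ [w]).filter (fun w => decide (PySem.Str.len w > 4)))
          :: pvFused ws [] 0
      else pvFused ws (cur ++ [w]) (c + PySem.Str.len w)

-- the segment list B's first pass appends for the remaining words
def pvSegTail : List String → List String → Int → List (List String × Bool)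
  | [], cur, _ => [(cur, false)]
  | w :: ws, cur, c =>
      if decide (c + PySem.Str.len w ≥ 250) then (cur ++ [w], true) :: pvSegTail ws [] 0
      else pvSegTail ws (cur ++ [w]) (c + PySem.Str.len w)

theorem pv_split_go_no_nl (s cur : List Char) (acc : List (List Char))
    (hacc : ∀ l ∈ acc, '\n' ∉ l) (hcur : '\n' ∉ cur) :
    ∀ l ∈ PySem.Chars.split₀.go s cur acc, '\n' ∉ l := by
  induction s generalizing cur acc with
  | nil =>
      intro l hl
      unfold PySem.Chars.split₀.go at hl
      split at hl
      · exact hacc l (List.mem_reverse.mp hl)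
      · rcases List.mem_cons.mp (List.mem_reverse.mp hl) with h | h
        · subst h; simpa using hcur
        · exact hacc l h
  | cons c rest ih =>
      intro l hl
      unfold PySem.Chars.split₀.go at hl
      by_cases hsp : PySem.Chars.isspace c = true
      · simp only [hsp, if_true] at hl
        by_cases hce : cur.isEmpty = true
        · simp only [hce, if_true] at hl
          exact ih [] acc hacc (by simp) l hl
        · simp only [hce, if_false] at hl
          refine ih [] (cur.reverse :: acc) ?_ (by simp) l hl
          intro m hm
          rcases List.mem_cons.mp hm with hm | hm
          · subst hm; simpa using hcur
          · exact hacc m hm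
      · simp only [hsp, if_false] at hl
        refine ih (c :: cur) acc hacc ?_ l hl
        intro hmem
        rcases List.mem_cons.mp hmem with h | h
        · subst h
          exact hsp (by decide)
        · exact hcur h

theorem pv_split_no_nl (text : String) :
    ∀ w ∈ PySem.Str.split₀ text, (w == "\n") = false := by
  intro w hw
  simp only [PySem.Str.split₀, List.mem_map] at hw
  obtain ⟨l, hl, rfl⟩ := hw
  have hnl : '\n' ∉ l := by
    have := pv_split_go_no_nl text.toList [] [] (by simp) (by simp)
    exact this l hl
  apply beq_eq_false_iff_ne.mpr
  intro h
  apply hnl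
  have : l = ("\n" : String).toList := by
    have := congrArg String.toList h
    simpa using this
  simp [this]

theorem pv_filter_append (cur : List String) (w : String) :
    (cur ++ [w]).filter (fun w => decide (PySem.Str.len w > 4))
      = cur.filter (fun w => decide (PySem.Str.len w > 4))
        ++ (if PySem.Str.len w > 4 then [w] else []) := by
  rw [List.filter_append, List.filter_singleton]
  by_cases h : PySem.Str.len w > 4
  · rw [if_pos h, decide_eq_true h]
    rfl
  · rw [if_neg h, decide_eq_false h]
    rfl

theorem pv_A_loop (words : List String)
    (hn : ∀ w ∈ words, (w == "\n") = false) :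
    ∀ (paras cur : List String) (c : Int),
      (let st := words.foldl (fun (st : List String × List String × Int) word =>
          let char_count := st.2.2 + PySem.Str.len word
          let temp := if PySem.Str.len word > 4 then st.2.1 ++ [word] else st.2.1
          if decide (char_count ≥ 250) || (word == "\n") then
            (st.1 ++ [PySem.Str.join " " temp], ([], (0 : Int)))
          else (st.1, (temp, char_count)))
        (paras, (cur.filter (fun w => decide (PySem.Str.len w > 4)), c));
       if st.2.1.isEmpty then st.1 else st.1 ++ [PySem.Str.join " " st.2.1])
      = paras ++ pvFused words cur c := by
  induction words with
  | nil =>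
      intro paras cur c
      show (if (cur.filter (fun w => decide (PySem.Str.len w > 4))).isEmpty then paras
          else paras ++ [PySem.Str.join " "
            (cur.filter (fun w => decide (PySem.Str.len w > 4)))])
        = paras ++ pvFused [] cur c
      unfold pvFused
      by_cases h : (cur.filter (fun w => decide (PySem.Str.len w > 4))).isEmpty = true
      · rw [if_pos h]
        show paras = paras ++ (if _ then _ else _)
        rw [if_pos h, List.append_nil]
      · rw [if_neg h]
        show _ = paras ++ (if _ then _ else _)
        rw [if_neg h]
  | cons w ws ih =>
      intro paras cur c
      have hw : (w == "\n") = false := hn w (List.mem_cons_self)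
      have hws : ∀ x ∈ ws, (x == "\n") = false := fun x hx => hn x (List.mem_cons_of_mem _ hx)
      simp only [List.foldl_cons, hw, Bool.or_false, pvFused]
      by_cases hc : c + PySem.Str.len w ≥ 250
      · simp only [hc, decide_true, if_true]
        have h1 : (if PySem.Str.len w > 4 then
              cur.filter (fun w => decide (PySem.Str.len w > 4)) ++ [w]
            else cur.filter (fun w => decide (PySem.Str.len w > 4)))
            = (cur ++ [w]).filter (fun w => decide (PySem.Str.len w > 4)) := by
          rw [pv_filter_append]
          by_cases h : PySem.Str.len w > 4
          · rw [if_pos h, if_pos h]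
          · rw [if_neg h, if_neg h, List.append_nil]
        rw [h1]
        have := ih hws (paras ++ [PySem.Str.join " "
            ((cur ++ [w]).filter (fun w => decide (PySem.Str.len w > 4)))]) [] 0
        simp only [List.filter_nil] at this
        rw [this, List.append_assoc]
        rfl
      · simp only [hc, decide_false, if_false]
        have h1 : (if PySem.Str.len w > 4 then
              cur.filter (fun w => decide (PySem.Str.len w > 4)) ++ [w]
            else cur.filter (fun w => decide (PySem.Str.len w > 4)))
            = (cur ++ [w]).filter (fun w => decide (PySem.Str.len w > 4)) := by
          rw [pv_filter_append]
          by_cases h : PySem.Str.len w > 4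
          · rw [if_pos h, if_pos h]
          · rw [if_neg h, if_neg h, List.append_nil]
        rw [h1]
        exact ih hws paras (cur ++ [w]) (c + PySem.Str.len w)

theorem pv_B_seg (words : List String) :
    ∀ (segs : List (List String × Bool)) (cur : List String) (c : Int),
      (let st := words.foldl (fun (st : List (List String × Bool) × List String × Int) w =>
          let current := st.2.1 ++ [w]
          let count := st.2.2 + PySem.Str.len w
          if decide (count ≥ 250) then (st.1 ++ [(current, true)], ([], (0 : Int)))
          else (st.1, (current, count))) (segs, (cur, c));
       st.1 ++ [(st.2.1, false)])
      = segs ++ pvSegTail words cur c := by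
  induction words with
  | nil => intro segs cur c; simp [pvSegTail]
  | cons w ws ih =>
      intro segs cur c
      simp only [List.foldl_cons, pvSegTail]
      by_cases hc : c + PySem.Str.len w ≥ 250
      · simp only [hc, decide_true, if_true]
        rw [ih (segs ++ [(cur ++ [w], true)]) [] 0, List.append_assoc]
        rfl
      · simp only [hc, decide_false, if_false]
        exact ih segs (cur ++ [w]) (c + PySem.Str.len w)

theorem pv_B_emit (words : List String) :
    ∀ (cur : List String) (c : Int) (res : List String),
      (pvSegTail words cur c).foldl (fun res seg =>
          let kept := seg.1.filter (fun w => decide (PySem.Str.len w > 4))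
          if seg.2 || !kept.isEmpty then res ++ [PySem.Str.join " " kept] else res) res
      = res ++ pvFused words cur c := by
  induction words with
  | nil =>
      intro cur c res
      show (if false || !(cur.filter (fun w => decide (PySem.Str.len w > 4))).isEmpty then
          res ++ [PySem.Str.join " " (cur.filter (fun w => decide (PySem.Str.len w > 4)))]
        else res) = res ++ pvFused [] cur c
      unfold pvFused
      by_cases h : (cur.filter (fun w => decide (PySem.Str.len w > 4))).isEmpty = true
      · rw [h]
        show res = res ++ (if _ then _ else _)
        rw [if_pos h, List.append_nil]
      · rw [eq_false_of_ne_true h]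
        show res ++ _ = res ++ (if _ then _ else _)
        rw [if_neg h]
  | cons w ws ih =>
      intro cur c res
      simp only [pvSegTail, pvFused]
      by_cases hc : c + PySem.Str.len w ≥ 250
      · simp only [hc, decide_true, if_true, List.foldl_cons, Bool.true_or]
        rw [ih [] 0, List.append_assoc]
        rfl
      · simp only [hc, decide_false, if_false]
        exact ih (cur ++ [w]) (c + PySem.Str.len w) res

-- ===== VERDICT (by name: the statement is the Claim_ definition above) =====
theorem separate_text_spec : Claim_equal_separate_text := by
  intro text _
  unfold Spec_separate_text separate_text separate_text_alt
  have hA := pv_A_loop (PySem.Str.split₀ text) (pv_split_no_nl text) [] [] 0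
  simp only [List.filter_nil, List.nil_append] at hA
  have hS := pv_B_seg (PySem.Str.split₀ text) [] [] 0
  simp only [List.nil_append] at hS
  have hE := pv_B_emit (PySem.Str.split₀ text) [] 0 []
  simp only [List.nil_append] at hE
  simp only []
  rw [hA, hS, hE]
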